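-- pv_equiv track=rewrite | github.com/lee-youn/Final-project | text-train/train_video.py | vote_slots
-- ===== SOURCE A (Python) =====
-- import collections
--
-- def vote_slots(slots_list: list[dict]) -> dict:
--     """각 슬롯 최빈값 선택(동수면 첫 등장 우선)."""
--     out = {}
--     for key in ["mv_dv","side_dv","mv_ov","side_ov","who_entered","earlier_or_later"]:
--         vals = [s[key] for s in slots_list if s.get(key)]
--         if not vals:
--             out[key] = None
--             continue
--         cnt = collections.Counter(vals)
--         out[key] = cnt.most_common(1)[0][0]
--     return out
-- ===== SOURCE B (Python) =====
-- def vote_slots(slots_list: list[dict]) -> dict: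
--     """Champion scan: keep a current champion per key; a truthy value dethrones it
--     only when a full recount over slots_list shows strictly more occurrences.
--     No counting table is built; ties keep the earlier-seen champion."""
--     def recount(key, v):
--         return sum(1 for s in slots_list if s.get(key) == v)
--     out = {}
--     for key in ["mv_dv", "side_dv", "mv_ov", "side_ov", "who_entered", "earlier_or_later"]:
--         best = None
--         for s in slots_list:
--             v = s.get(key)
--             if v and (best is None or recount(key, v) > recount(key, best)):
--                 best = v
--         out[key] = best
--     return out
-- ===== Notes on version B (the rewrite author's own statement) =====
-- stated objective: alternative
-- what changed: Replaces Counter tallying plus most_common(1) by a champion-challenger scan: walk the slots keeping one current best value per key and dethrone it only when a full recount over slots_list shows strictly more occurrences, so no frequency table is ever built (trades O(k*n) counting for O(k*n^2) rescans).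
import Mathlib
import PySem

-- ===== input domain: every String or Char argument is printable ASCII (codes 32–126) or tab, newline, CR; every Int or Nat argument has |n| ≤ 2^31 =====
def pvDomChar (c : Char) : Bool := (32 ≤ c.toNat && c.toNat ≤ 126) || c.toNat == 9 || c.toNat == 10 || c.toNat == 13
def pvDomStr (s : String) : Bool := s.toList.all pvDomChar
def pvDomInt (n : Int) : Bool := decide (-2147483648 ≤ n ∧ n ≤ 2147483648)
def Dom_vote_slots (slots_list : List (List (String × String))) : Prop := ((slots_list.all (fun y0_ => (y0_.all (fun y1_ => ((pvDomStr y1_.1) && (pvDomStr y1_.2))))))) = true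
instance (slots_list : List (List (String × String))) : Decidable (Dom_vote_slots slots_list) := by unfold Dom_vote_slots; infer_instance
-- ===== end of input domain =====

-- B replaces A's Counter + most_common(1) per key by a champion-challenger scan with
-- full recounts and no frequency table (alternative algorithm; not faster).


-- ===== PORT A =====
def voteKeys : List String := ["mv_dv", "side_dv", "mv_ov", "side_ov", "who_entered", "earlier_or_later"]

-- truthiness of s.get(key) for a str-valued dict: present and non-empty
def pyTruthy : Option String → Bool
  | some v => v != ""
  | none => false

-- cnt.most_common(1)[0][0] for a non-empty counter (none when empty): semantic port of the
-- stdlib call — first key attaining the maximal count, in the counter's insertion order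
def mostCommon1 (d : PySem.Dict String Int) : Option String :=
  (d.items.foldl (fun (b : Option String × Int) p => if p.2 > b.2 then (some p.1, p.2) else b)
    (none, 0)).1

-- vals = [s[key] for s in slots_list if s.get(key)]
def valsA (slots_list : List (List (String × String))) (key : String) : List String :=
  (slots_list.filter (fun s => pyTruthy ((PySem.Dict.mk s).get? key))).map
    (fun s => (PySem.Dict.mk s).getD key "")   -- s[key]; present by the filter, so getD is exact

def valA (slots_list : List (List (String × String))) (key : String) : Option String :=
  if (valsA slots_list key).isEmpty then none
  else mostCommon1 (PySem.Dict.counter (valsA slots_list key))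

def vote_slots (slots_list : List (List (String × String))) : List (String × Option String) :=
  (voteKeys.foldl (fun (out : PySem.Dict String (Option String)) key =>
      out.insert key (valA slots_list key)) PySem.Dict.empty).items

-- ===== PORT B =====
-- recount(key, v) = sum(1 for s in slots_list if s.get(key) == v)
-- (a 0/1-generator sum is a countP; s.get(key) == v is 'get? = some v' since v is a string)
def recountB (slots_list : List (List (String × String))) (key v : String) : Int :=
  (slots_list.countP (fun s => (PySem.Dict.mk s).get? key == some v) : Int)

-- best = None; for s: v = s.get(key); if v and (best is None or recount(v) > recount(best)): best = v
def bestB (slots_list : List (List (String × String))) (key : String) : Option String :=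
  slots_list.foldl (fun best s =>
    match (PySem.Dict.mk s).get? key with
    | some v =>
        if v != "" then
          match best with
          | none => some v
          | some b =>
              if recountB slots_list key v > recountB slots_list key b then some v else best
        else best
    | none => best) none

def vote_slots_alt (slots_list : List (List (String × String))) : List (String × Option String) :=
  (voteKeys.foldl (fun (out : PySem.Dict String (Option String)) key =>
      out.insert key (bestB slots_list key)) PySem.Dict.empty).items

-- ===== PRECONDITION & SPEC =====
def Spec_vote_slots (slots_list : List (List (String × String))) (out : List (String × Option String)) : Prop := out = vote_slots_alt slots_list
instance (slots_list : List (List (String × String))) (out : List (String × Option String)) : Decidable (Spec_vote_slots slots_list out) := by unfold Spec_vote_slots; infer_instance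

-- ===== CLAIM (what is proved, stated in full; the proofs are below) =====
def Claim_equal_vote_slots : Prop := ∀ (slots_list : List (List (String × String))), Dom_vote_slots slots_list → Spec_vote_slots slots_list (vote_slots slots_list)

-- ===== LEMMAS AND PROOFS =====

-- the common abstraction: one challenger step of the first-seen strict-max scan
def stepV (cnt : String → Int) (b : Option String) (v : String) : Option String :=
  match b with
  | none => some v
  | some m => if cnt v > cnt m then some v else b

-- B's slot loop IS the challenger scan over the filtered value list (cnt is FIXED)
theorem bflat (cnt : String → Int) (key : String) :
    ∀ (slots : List (List (String × String))) (b : Option String),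
    slots.foldl (fun best s =>
      match (PySem.Dict.mk s).get? key with
      | some v =>
          if v != "" then
            match best with
            | none => some v
            | some m => if cnt v > cnt m then some v else best
          else best
      | none => best) b
    = (valsA slots key).foldl (stepV cnt) b := by
  intro slots
  induction slots with
  | nil => intro b; rfl
  | cons s rest ih =>
    intro b
    rw [List.foldl_cons]
    cases h : (PySem.Dict.mk s).get? key with
    | none =>
      rw [show valsA (s :: rest) key = valsA rest key from by simp [valsA, pyTruthy, h]]
      simpa using ih b
    | some v =>
      by_cases hv : (v != "") = true
      · rw [show valsA (s :: rest) key
            = (PySem.Dict.mk s).getD key "" :: valsA rest key from by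
          simp [valsA, pyTruthy, h, hv]]
        rw [PySem.Dict.getD_of_get?_eq_some _ _ h, List.foldl_cons]
        have : (match b with
            | none => some v
            | some m => if cnt v > cnt m then some v else b) = stepV cnt b v := by
          cases b <;> rfl
        simp only [hv, if_true]
        rw [this]; exact ih _
      · rw [show valsA (s :: rest) key = valsA rest key from by simp [valsA, pyTruthy, h, hv]]
        simp only [hv, Bool.false_eq_true, if_false]
        exact ih b

-- the challenger scan only cares about cnt's values on the list and at the champion
theorem stepV_congr (cnt1 cnt2 : String → Int) :
    ∀ (l : List String) (b : Option String),
    (∀ v ∈ l, cnt1 v = cnt2 v) →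
    (b = none ∨ ∃ m, b = some m ∧ cnt1 m = cnt2 m) →
    l.foldl (stepV cnt1) b = l.foldl (stepV cnt2) b := by
  intro l
  induction l with
  | nil => intros; rfl
  | cons v rest ih =>
    intro b hl hb
    have hv : cnt1 v = cnt2 v := hl v (List.mem_cons_self ..)
    have hrest : ∀ u ∈ rest, cnt1 u = cnt2 u := fun u hu => hl u (List.mem_cons_of_mem _ hu)
    rw [List.foldl_cons, List.foldl_cons]
    rcases hb with hb | ⟨m, hb, hm⟩
    · subst hb
      exact ih _ hrest (Or.inr ⟨v, rfl, hv⟩)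
    · subst hb
      simp only [stepV, hv, hm]
      split_ifs with h
      · exact ih _ hrest (Or.inr ⟨v, rfl, hv⟩)
      · exact ih _ hrest (Or.inr ⟨m, rfl, hm⟩)

-- every value in vals is truthy
theorem mem_valsA_ne (slots : List (List (String × String))) (key v : String)
    (h : v ∈ valsA slots key) : v ≠ "" := by
  unfold valsA at h
  rcases List.mem_map.mp h with ⟨s, hs, hv⟩
  have ht := (List.mem_filter.mp hs).2
  cases hg : (PySem.Dict.mk s).get? key with
  | none => simp [pyTruthy, hg] at ht
  | some w =>
    rw [PySem.Dict.getD_of_get?_eq_some _ _ hg] at hv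
    simp only [pyTruthy, hg] at ht
    subst hv
    simpa using ht

-- for truthy v, B's recount equals the Counter's count of v in vals
theorem recount_eq (key v : String) (hv : v ≠ "") :
    ∀ (slots : List (List (String × String))),
    recountB slots key v = ((valsA slots key).count v : Int) := by
  intro slots
  induction slots with
  | nil => rfl
  | cons s rest ih =>
    unfold recountB at ih ⊢
    rw [List.countP_cons]
    cases h : (PySem.Dict.mk s).get? key with
    | none =>
      rw [show valsA (s :: rest) key = valsA rest key from by simp [valsA, pyTruthy, h]]
      simp [ih]
    | some w =>
      by_cases hw : w = v
      · subst hw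
        rw [show valsA (s :: rest) key
              = (PySem.Dict.mk s).getD key "" :: valsA rest key from by
            simp [valsA, pyTruthy, h, hv]]
        rw [PySem.Dict.getD_of_get?_eq_some _ _ h]
        simp [ih]
      · by_cases htr : (w != "") = true
        · rw [show valsA (s :: rest) key
                = (PySem.Dict.mk s).getD key "" :: valsA rest key from by
              simp [valsA, pyTruthy, h, htr]]
          rw [PySem.Dict.getD_of_get?_eq_some _ _ h]
          simp [hw, ih]
        · rw [show valsA (s :: rest) key = valsA rest key from by
              simp [valsA, pyTruthy, h, htr]]
          simp [hw, ih]

-- pairing: the (best, best_count) fold of most_common over (v, cnt v) pairs is the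
-- challenger scan, as long as every count is positive
def pairOf (cnt : String → Int) : Option String → Option String × Int
  | none => (none, 0)
  | some m => (some m, cnt m)

theorem pair_eq (cnt : String → Int) :
    ∀ (ds : List String), (∀ v ∈ ds, 0 < cnt v) → ∀ (b : Option String),
    (ds.map (fun v => (v, cnt v))).foldl
        (fun (b : Option String × Int) p => if p.2 > b.2 then (some p.1, p.2) else b)
        (pairOf cnt b)
    = pairOf cnt (ds.foldl (stepV cnt) b) := by
  intro ds
  induction ds with
  | nil => intros; rfl
  | cons v rest ih =>
    intro hpos b
    have hv : 0 < cnt v := hpos v (List.mem_cons_self ..)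
    have hrest : ∀ u ∈ rest, 0 < cnt u := fun u hu => hpos u (List.mem_cons_of_mem _ hu)
    rw [List.map_cons, List.foldl_cons, List.foldl_cons]
    have : (if cnt v > (pairOf cnt b).2 then (some v, cnt v) else pairOf cnt b)
        = pairOf cnt (stepV cnt b v) := by
      cases b with
      | none => simp [pairOf, stepV, hv]
      | some m =>
        simp only [pairOf, stepV]
        split_ifs <;> rfl
    have this2 : (if (v, cnt v).2 > (pairOf cnt b).2 then (some (v, cnt v).1, (v, cnt v).2)
        else pairOf cnt b) = pairOf cnt (stepV cnt b v) := this
    rw [this2]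
    exact ih hrest _

-- dedup-irrelevance: the challenger scan over set(l) (first occurrences) equals the scan
-- over l itself, because a repeat challenger never beats the current champion
theorem scan_ofList (cnt : String → Int) :
    ∀ (l : List String) (s : List String) (b : Option String),
    s.foldl (stepV cnt) none = b →
    (∀ v ∈ s, ∃ m, b = some m ∧ cnt v ≤ cnt m) →
    (l.foldl PySem.Set.add s).foldl (stepV cnt) none = l.foldl (stepV cnt) b := by
  intro l
  induction l with
  | nil => intro s b h1 _; simpa using h1
  | cons v rest ih =>
    intro s b h1 h2
    rw [List.foldl_cons, List.foldl_cons]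
    by_cases hmem : v ∈ s
    · rw [PySem.Set.add_of_mem hmem]
      rcases h2 v hmem with ⟨m, hb, hle⟩
      subst hb
      have hst : stepV cnt (some m) v = some m := by
        simp [stepV, not_lt.mpr hle]
      rw [hst]
      exact ih s _ h1 h2
    · rw [PySem.Set.add_of_not_mem hmem]
      apply ih
      · rw [List.foldl_append, h1]; rfl
      · intro u hu
        rcases List.mem_append.mp hu with hu | hu
        · rcases h2 u hu with ⟨m, hb, hle⟩
          subst hb
          refine ⟨if cnt v > cnt m then v else m, ?_, ?_⟩
          · simp only [stepV]; split_ifs <;> rfl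
          · split_ifs with h
            · exact le_of_lt (lt_of_le_of_lt hle h)
            · exact hle
        · rw [List.mem_singleton.mp hu]
          cases b with
          | none =>
            exact ⟨v, rfl, le_refl _⟩
          | some m =>
            refine ⟨if cnt v > cnt m then v else m, ?_, ?_⟩
            · simp only [stepV]; split_ifs <;> rfl
            · split_ifs with h
              · exact le_refl _
              · exact not_lt.mp h

-- per-key agreement: A's Counter/most_common value equals B's champion scan
theorem perKey (slots : List (List (String × String))) (key : String) :
    valA slots key = bestB slots key := by
  have hB : bestB slots key
      = (valsA slots key).foldl (stepV (recountB slots key)) none :=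
    bflat (recountB slots key) key slots none
  have hswap : (valsA slots key).foldl (stepV (recountB slots key)) none
      = (valsA slots key).foldl (stepV (fun v => ((valsA slots key).count v : Int))) none := by
    apply stepV_congr
    · intro v hv
      exact recount_eq key v (mem_valsA_ne slots key v hv) slots
    · exact Or.inl rfl
  rw [hB, hswap]
  set cnt : String → Int := fun v => ((valsA slots key).count v : Int) with hcnt
  unfold valA
  split_ifs with he
  · rw [List.isEmpty_iff.mp he]; rfl
  · -- nonempty vals: most_common(1) over the counter is the scan over set(vals),
    -- which equals the scan over vals
    have hitems : (PySem.Dict.counter (valsA slots key)).items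
        = (PySem.Set.ofList (valsA slots key)).map (fun k => (k, ((valsA slots key).count k : Int))) :=
      PySem.Dict.items_counter _
    have hpos : ∀ v ∈ PySem.Set.ofList (valsA slots key), 0 < cnt v := by
      intro v hv
      have : v ∈ valsA slots key := (PySem.Set.mem_ofList _ _).mp hv
      simp only [hcnt]
      exact_mod_cast List.count_pos_iff.mpr this
    unfold mostCommon1
    rw [hitems]
    rw [show ((none : Option String), (0 : Int)) = pairOf cnt none from rfl]
    rw [pair_eq cnt _ hpos none]
    rw [show (PySem.Set.ofList (valsA slots key))
          = (valsA slots key).foldl PySem.Set.add [] from rfl] at *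
    rw [scan_ofList cnt (valsA slots key) [] none rfl (by simp)]
    cases (valsA slots key).foldl (stepV cnt) none <;> rfl

-- ===== VERDICT (by name: the statement is the Claim_ definition above) =====
theorem vote_slots_spec : Claim_equal_vote_slots := by
  intro slots_list _
  unfold Spec_vote_slots vote_slots vote_slots_alt
  congr 1
  refine PySem.List.foldl_congr_mem _ _ _ _ ?_
  intro out key _
  rw [perKey slots_list key]
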